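-- pv_equiv track=rewrite | github.com/fengmi9312/Final-State-Dynamic-Vaccine-Prioritization | Dependencies/CodeDependencies/func.py | order_index
-- ===== SOURCE A (Python) =====
-- def order_index(m_arr):
--     idx_list = [idx for idx in sorted(range(len(m_arr)), key=lambda i: m_arr[i], reverse=True)]
--     res = [[idx_list[0]]]
--     for idx in idx_list[1:]:
--         if m_arr[idx] == m_arr[res[-1][-1]]:
--             res[-1].append(idx)
--         else:
--             res.append([idx])
--     return res
-- ===== SOURCE B (Python) =====
-- def order_index(m_arr):
--     groups = {}
--     for i, v in enumerate(m_arr):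
--         groups.setdefault(v, []).append(i)
--     return [groups[v] for v in sorted(groups, reverse=True)]
-- ===== Notes on version B (the rewrite author's own statement) =====
-- stated objective: idiomatic
-- what changed: Replaces the stable descending sort of all indices plus consecutive-run grouping with a single-pass dict grouping value->indices followed by a descending sort of the distinct keys.
-- crash fix: On the empty list A raises IndexError (idx_list[0]); B naturally returns []. — e.g. on order_index([]): A raises IndexError, B returns []
import Mathlib
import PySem

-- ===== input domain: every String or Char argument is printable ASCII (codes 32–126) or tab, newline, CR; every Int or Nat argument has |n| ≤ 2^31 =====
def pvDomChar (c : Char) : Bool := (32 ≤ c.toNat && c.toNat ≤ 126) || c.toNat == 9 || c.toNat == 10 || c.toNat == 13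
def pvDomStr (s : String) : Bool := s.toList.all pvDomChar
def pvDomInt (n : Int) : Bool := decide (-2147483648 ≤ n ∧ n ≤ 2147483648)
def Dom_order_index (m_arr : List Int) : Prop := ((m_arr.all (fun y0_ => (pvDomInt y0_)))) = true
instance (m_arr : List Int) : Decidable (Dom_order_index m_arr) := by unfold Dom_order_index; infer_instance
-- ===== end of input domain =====

-- B replaces A's stable descending index sort + consecutive-run grouping by a one-pass
-- dict grouping value -> indices followed by a descending sort of the distinct keys.

-- ===== PORT A =====
-- loop body of A's grouping for-loop (res[-1], res[-1][-1] via pyGetD with negative index)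
def order_index_step (m_arr : List Int) (res : List (List Int)) (idx : Int) : List (List Int) :=
  if PySem.List.pyGetD m_arr idx 0 =
     PySem.List.pyGetD m_arr (PySem.List.pyGetD (PySem.List.pyGetD res (-1) []) (-1) 0) 0
  then res.dropLast ++ [PySem.List.pyGetD res (-1) [] ++ [idx]]
  else res ++ [[idx]]

def order_index (m_arr : List Int) : List (List Int) :=
  let idx_list := PySem.List.sorted (PySem.List.pyRange 0 (PySem.List.len m_arr))
      (fun i => PySem.List.pyGetD m_arr i 0) true
  match idx_list with
  | [] => []   -- Python raises IndexError here (idx_list[0]); excluded by Pre_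
  | h :: t => t.foldl (order_index_step m_arr) [[h]]

-- ===== PORT B =====
def order_index_alt (m_arr : List Int) : List (List Int) :=
  let groups := (PySem.List.enumerate m_arr 0).foldl
      (fun d p => d.modify p.2 [] (fun l => l ++ [p.1])) PySem.Dict.empty
  (PySem.List.sorted groups.keys (fun v => v) true).map (fun v => groups.getD v [])

-- ===== PRECONDITION & SPEC =====
def Pre_order_index (m_arr : List Int) : Prop := m_arr ≠ []
instance (m_arr : List Int) : Decidable (Pre_order_index m_arr) := by unfold Pre_order_index; infer_instance
def pvWitness_order_index : List Int := ([3, 1, 3, 2])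

-- On the empty list A raises IndexError (idx_list[0]); B naturally returns [].
def Raises_order_index (m_arr : List Int) : Prop := m_arr = []
instance (m_arr : List Int) : Decidable (Raises_order_index m_arr) := by unfold Raises_order_index; infer_instance
def pvRaiseWitness_order_index : List Int := ([])
def pvRaiseWitnessOut_order_index : List (List Int) := []

def Spec_order_index (m_arr : List Int) (out : List (List Int)) : Prop := out = order_index_alt m_arr
instance (m_arr : List Int) (out : List (List Int)) : Decidable (Spec_order_index m_arr out) := by unfold Spec_order_index; infer_instance

-- ===== CLAIM (what is proved, stated in full; the proofs are below) =====
def Claim_equal_order_index : Prop := ∀ (m_arr : List Int), Dom_order_index m_arr → Pre_order_index m_arr → Spec_order_index m_arr (order_index m_arr)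
def Claim_raises_order_index : Prop := (∀ (m_arr : List Int), Dom_order_index m_arr → Raises_order_index m_arr → ¬ Pre_order_index m_arr) ∧ (Dom_order_index (pvRaiseWitness_order_index) ∧ Raises_order_index (pvRaiseWitness_order_index) ∧ order_index_alt (pvRaiseWitness_order_index) = pvRaiseWitnessOut_order_index)

-- ===== LEMMAS AND PROOFS =====

-- the ascending list of indices of m_arr holding value v
def pvBkt (m : List Int) (v : Int) : List Int :=
  ((PySem.List.enumerate m 0).filter (fun p => p.2 == v)).map (fun p => p.1)

-- the common canonical result: distinct values descending, each mapped to its index bucket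
def pvCanon (m : List Int) : List (List Int) :=
  (PySem.List.sorted (PySem.List.dedup m) (fun v => v) true).map (pvBkt m)

-- insertBy basics
lemma insertBy_nil {α : Type} (before : α → α → Bool) (x : α) :
    PySem.List.insertBy before x [] = [x] := rfl

lemma insertBy_cons_pos {α : Type} (before : α → α → Bool) (x y : α) (ys : List α)
    (h : before x y = true) :
    PySem.List.insertBy before x (y :: ys) = x :: y :: ys := by
  simp [PySem.List.insertBy, h]

lemma insertBy_cons_neg {α : Type} (before : α → α → Bool) (x y : α) (ys : List α)
    (h : before x y = false) :
    PySem.List.insertBy before x (y :: ys) = y :: PySem.List.insertBy before x ys := by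
  simp [PySem.List.insertBy, h]

lemma insertBy_append_of_forall {α : Type} (before : α → α → Bool) (x : α)
    (as bs : List α) (h : ∀ a ∈ as, before x a = false) :
    PySem.List.insertBy before x (as ++ bs) = as ++ PySem.List.insertBy before x bs := by
  induction as with
  | nil => simp
  | cons a as ih =>
      simp only [List.cons_append]
      rw [insertBy_cons_neg _ _ _ _ (h a (by simp))]
      simp only [ih (fun a ha => h a (by simp [ha]))]

lemma insertBy_cons_of_head {α : Type} (before : α → α → Bool) (x : α) (ys : List α)
    (h : ∀ y ∈ ys, before x y = true) :
    PySem.List.insertBy before x ys = x :: ys := by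
  cases ys with
  | nil => rfl
  | cons y ys => exact insertBy_cons_pos _ _ _ _ (h y (by simp))

-- inserting one element into a flatten of strictly-descending key blocks
lemma insert_grouped (key : Int → Int) (x : Int) (vs : List Int) (g : Int → List Int)
    (hs : vs.Pairwise (fun a b => b < a))
    (hg : ∀ v ∈ vs, ∀ i ∈ g v, key i = v)
    (hne : ∀ v ∈ vs, g v ≠ [])
    (hnew : key x ∉ vs → g (key x) = []) :
    PySem.List.insertBy (fun a b => decide (key b < key a)) x (vs.flatMap g) =
    (if key x ∈ vs then vs
     else PySem.List.insertBy (fun a b => decide (b < a)) (key x) vs).flatMap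
      (fun v => if v = key x then g v ++ [x] else g v) := by
  induction vs with
  | nil =>
      simp only [List.flatMap_nil, List.not_mem_nil, if_false, insertBy_nil]
      simp [hnew (by simp)]
  | cons v tl ih =>
      have htl_lt : ∀ u ∈ tl, u < v := fun u hu => (List.pairwise_cons.mp hs).1 u hu
      have hgv : ∀ i ∈ g v, key i = v := hg v (by simp)
      have hflat : ∀ y ∈ tl.flatMap g, key y < v := by
        intro y hy
        obtain ⟨u, hu, hyu⟩ := List.mem_flatMap.mp hy
        rw [hg u (by simp [hu]) y hyu]; exact htl_lt u hu
      rcases lt_trichotomy (key x) v with hlt | heq | hgt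
      · -- key x < v : skip the g v block and recurse
        have hnotv : key x ≠ v := ne_of_lt hlt
        have step : PySem.List.insertBy (fun a b => decide (key b < key a)) x ((v :: tl).flatMap g)
            = g v ++ PySem.List.insertBy (fun a b => decide (key b < key a)) x (tl.flatMap g) := by
          rw [List.flatMap_cons]
          exact insertBy_append_of_forall _ _ _ _ (by
            intro a ha; simp only [decide_eq_false_iff_not, not_lt]
            rw [hgv a ha]; exact le_of_lt hlt)
        rw [step, ih (List.pairwise_cons.mp hs).2
          (fun u hu => hg u (by simp [hu])) (fun u hu => hne u (by simp [hu]))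
          (fun hn => hnew (by simp [hnotv, hn]))]
        have hmem_iff : (key x ∈ v :: tl) = (key x ∈ tl) := by simp [hnotv]
        have hvx : ¬ v = key x := fun hh => hnotv hh.symm
        by_cases hmem : key x ∈ tl
        · simp only [hmem, if_true, hmem_iff]
          simp [List.flatMap_cons, hvx]
        · simp only [hmem, if_false, hmem_iff]
          rw [insertBy_cons_neg _ _ _ _ (by simp [not_lt.mpr (le_of_lt hlt)])]
          simp [List.flatMap_cons, hvx]
      · -- key x = v : append x at the end of the g v block
        have step : PySem.List.insertBy (fun a b => decide (key b < key a)) x ((v :: tl).flatMap g)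
            = g v ++ PySem.List.insertBy (fun a b => decide (key b < key a)) x (tl.flatMap g) := by
          rw [List.flatMap_cons]
          exact insertBy_append_of_forall _ _ _ _ (by
            intro a ha; simp only [decide_eq_false_iff_not, not_lt]
            rw [hgv a ha, heq])
        rw [step, insertBy_cons_of_head _ _ _ (by
          intro y hy; simp only [decide_eq_true_eq]
          rw [heq]; exact hflat y hy)]
        have htlcongr : tl.flatMap (fun u => if u = v then g u ++ [x] else g u) = tl.flatMap g := by
          apply List.flatMap_congr
          intro u hu
          rw [if_neg (ne_of_lt (htl_lt u hu))]
        rw [heq, if_pos (by simp : v ∈ v :: tl), List.flatMap_cons, if_pos rfl, htlcongr]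
        simp
      · -- v < key x : x opens a new block in front
        have hnotmem : key x ∉ v :: tl := by
          intro hm
          rcases List.mem_cons.mp hm with h1 | h2
          · exact absurd h1 (ne_of_gt hgt)
          · exact absurd (htl_lt _ h2) (not_lt.mpr (le_of_lt hgt))
        rw [insertBy_cons_of_head _ _ _ (by
          intro y hy
          obtain ⟨u, hu, hyu⟩ := List.mem_flatMap.mp hy
          simp only [decide_eq_true_eq]
          rw [hg u hu y hyu]
          rcases List.mem_cons.mp hu with h1 | h2
          · omega
          · exact lt_trans (htl_lt u h2) hgt)]
        simp only [hnotmem, if_false]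
        rw [insertBy_cons_pos _ _ _ _ (by simp [hgt])]
        have hcongr : (v :: tl).flatMap (fun u => if u = key x then g u ++ [x] else g u)
            = (v :: tl).flatMap g := by
          apply List.flatMap_congr
          intro u hu
          have hu' : u ≠ key x := by
            rcases List.mem_cons.mp hu with h1 | h2
            · omega
            · exact ne_of_lt (lt_trans (htl_lt u h2) hgt)
          rw [if_neg hu']
        have hrhs : List.flatMap (fun u => if u = key x then g u ++ [x] else g u) (key x :: v :: tl)
            = (g (key x) ++ [x]) ++ (v :: tl).flatMap g := by
          rw [List.flatMap_cons, if_pos rfl, hcongr]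
        rw [hrhs, hnew hnotmem]
        simp

lemma dedup_append_singleton (l : List Int) (a : Int) :
    PySem.List.dedup (l ++ [a]) =
    if a ∈ l then PySem.List.dedup l else PySem.List.dedup l ++ [a] := by
  simp only [PySem.List.dedup_eq_ofList, PySem.Set.ofList]
  rw [List.foldl_append]
  have hmem : a ∈ List.foldl PySem.Set.add PySem.Set.empty l ↔ a ∈ l := PySem.Set.mem_ofList l a
  by_cases h : a ∈ l
  · have hc : (List.foldl PySem.Set.add PySem.Set.empty l).contains a = true := by
      simpa [List.contains_iff_mem] using hmem.mpr h
    simp only [List.foldl_cons, List.foldl_nil, PySem.Set.add, hc, if_true, h]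
  · have hc : (List.foldl PySem.Set.add PySem.Set.empty l).contains a = false := by
      simpa [List.contains_iff_mem] using fun hm => h (hmem.mp hm)
    simp only [List.foldl_cons, List.foldl_nil, PySem.Set.add, hc, if_false, h,
      Bool.false_eq_true]

lemma sorted_dedup_pairwise_gt (m : List Int) :
    (PySem.List.sorted (PySem.List.dedup m) (fun v => v) true).Pairwise (fun a b => b < a) := by
  have h1 := PySem.List.sorted_pairwise_rev (PySem.List.dedup m) (fun v => v)
  have h2 : (PySem.List.sorted (PySem.List.dedup m) (fun v => v) true).Nodup :=
    (PySem.List.sorted_perm (PySem.List.dedup m) (fun v => v) true).symm.nodup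
      (PySem.List.nodup_dedup m)
  exact (h1.and h2).imp (fun hab => lt_of_le_of_ne hab.1 (Ne.symm hab.2))

lemma sorted_rev_append_singleton (d : List Int) (a : Int) :
    PySem.List.sorted (d ++ [a]) (fun v => v) true
    = PySem.List.insertBy (fun x y => decide (y < x)) a
        (PySem.List.sorted d (fun v => v) true) := by
  rw [PySem.List.sorted_rev_eq_foldl_insertBy, List.foldl_append,
    ← PySem.List.sorted_rev_eq_foldl_insertBy]
  rfl

-- stable reverse sort = flatten of value buckets over the descending distinct values
lemma sorted_rev_group (key : Int → Int) (l : List Int) :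
    PySem.List.sorted l key true =
    (PySem.List.sorted (PySem.List.dedup (l.map key)) (fun v => v) true).flatMap
      (fun v => l.filter (fun i => key i == v)) := by
  induction l using List.reverseRecOn with
  | nil => simp [PySem.List.sorted, PySem.List.dedup]
  | append_singleton l x ih =>
      have hfold := PySem.List.sorted_rev_eq_foldl_insertBy (l ++ [x]) key
      rw [List.foldl_append, List.foldl_cons, List.foldl_nil,
        ← PySem.List.sorted_rev_eq_foldl_insertBy l key, ih] at hfold
      rw [hfold]
      have hvsmem : ∀ w : Int, w ∈ PySem.List.sorted (PySem.List.dedup (l.map key)) (fun v => v) true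
          ↔ w ∈ l.map key := by
        intro w
        rw [PySem.List.mem_sorted, PySem.List.mem_dedup]
      rw [insert_grouped key x _ _ (sorted_dedup_pairwise_gt (l.map key))
        (fun v _ i hi => by simpa using (List.of_mem_filter hi))
        (fun v hv => by
          obtain ⟨i, hil, hk⟩ := List.mem_map.mp ((hvsmem v).mp hv)
          exact List.ne_nil_of_mem (List.mem_filter.mpr ⟨hil, by simp [hk]⟩))
        (fun hn => by
          rw [List.filter_eq_nil_iff]
          intro i hil hk
          exact hn ((hvsmem (key x)).mpr (List.mem_map.mpr ⟨i, hil, by simpa using hk⟩)))]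
      have hfilter : ∀ w : Int,
          (l ++ [x]).filter (fun i => key i == w)
          = if w = key x then l.filter (fun i => key i == w) ++ [x]
            else l.filter (fun i => key i == w) := by
        intro w
        rw [List.filter_append]
        by_cases hw : w = key x
        · simp [hw]
        · have hb : (key x == w) = false := by
            simp only [beq_eq_false_iff_ne, ne_eq]
            exact fun h => hw h.symm
          simp [hb, hw]
      by_cases hmem : key x ∈ l.map key
      · rw [List.map_append, List.map_singleton, dedup_append_singleton,
          if_pos ((hvsmem (key x)).mpr hmem),
          if_pos (by simpa using hmem : key x ∈ List.map key l)]
        apply List.flatMap_congr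
        intro v hv
        rw [hfilter v]
      · rw [List.map_append, List.map_singleton, dedup_append_singleton,
          if_neg (fun hm => hmem ((hvsmem (key x)).mp hm)),
          if_neg (by simpa using hmem : ¬ key x ∈ List.map key l),
          sorted_rev_append_singleton]
        apply List.flatMap_congr
        intro v hv
        rw [hfilter v]

-- A's grouping loop over one constant-key block appends to the last group
lemma fold_block (m : List Int) (v : Int) :
    ∀ (b : List Int), (∀ i ∈ b, PySem.List.pyGetD m i 0 = v) →
    ∀ (pre : List (List Int)) (lb : List Int), lb ≠ [] →
      PySem.List.pyGetD m (PySem.List.pyGetD lb (-1) 0) 0 = v →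
      b.foldl (order_index_step m) (pre ++ [lb]) = pre ++ [lb ++ b] := by
  intro b
  induction b with
  | nil => intro _ pre lb _ _; simp
  | cons idx b' ih =>
      intro hkeys pre lb hlb hlast
      have hstep : order_index_step m (pre ++ [lb]) idx = pre ++ [lb ++ [idx]] := by
        unfold order_index_step
        rw [PySem.List.pyGetD_neg_one_append_singleton, hlast,
          if_pos (hkeys idx (by simp)), List.dropLast_concat]
      rw [List.foldl_cons, hstep,
        ih (fun i hi => hkeys i (by simp [hi])) pre (lb ++ [idx]) (by simp) (by
          rw [PySem.List.pyGetD_neg_one_append_singleton]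
          exact hkeys idx (by simp))]
      simp

-- A's grouping loop over a flatten of strictly smaller-valued blocks appends them as groups
lemma fold_flatten (m : List Int) (g : Int → List Int) :
    ∀ (vs : List Int), vs.Pairwise (fun a b => b < a) →
    (∀ v ∈ vs, ∀ i ∈ g v, PySem.List.pyGetD m i 0 = v) →
    (∀ v ∈ vs, g v ≠ []) →
    ∀ (pre : List (List Int)) (lb : List Int) (w : Int), lb ≠ [] →
      PySem.List.pyGetD m (PySem.List.pyGetD lb (-1) 0) 0 = w →
      (∀ v ∈ vs, v < w) →
      (vs.flatMap g).foldl (order_index_step m) (pre ++ [lb]) = (pre ++ [lb]) ++ vs.map g := by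
  intro vs
  induction vs with
  | nil => intro _ _ _ pre lb w _ _ _; simp
  | cons v tl ih =>
      intro hs hg hne pre lb w hlb hlast hless
      obtain ⟨a, rest, hga⟩ := List.exists_cons_of_ne_nil (hne v (by simp))
      have hgv : ∀ i ∈ g v, PySem.List.pyGetD m i 0 = v := hg v (by simp)
      rw [List.flatMap_cons, List.foldl_append]
      have h1 : (g v).foldl (order_index_step m) (pre ++ [lb]) = (pre ++ [lb]) ++ [g v] := by
        rw [hga, List.foldl_cons]
        have hstep : order_index_step m (pre ++ [lb]) a = (pre ++ [lb]) ++ [[a]] := by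
          unfold order_index_step
          rw [PySem.List.pyGetD_neg_one_append_singleton, hlast,
            if_neg (by rw [hgv a (by simp [hga])]; exact ne_of_lt (hless v (by simp)))]
        rw [hstep,
          fold_block m v rest (fun i hi => hgv i (by simp [hga, hi])) (pre ++ [lb]) [a]
            (by simp) (by
              have := PySem.List.pyGetD_neg_one_append_singleton ([] : List Int) a 0
              simp only [List.nil_append] at this
              rw [this]; exact hgv a (by simp [hga]))]
        simp
      rw [h1,
        ih (List.pairwise_cons.mp hs).2 (fun u hu => hg u (by simp [hu]))
          (fun u hu => hne u (by simp [hu])) (pre ++ [lb]) (g v) v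
          (by rw [hga]; simp)
          (by
            rw [PySem.List.pyGetD_neg_one (g v) 0 (by rw [hga]; simp)]
            exact hgv _ (List.getLast_mem _))
          (fun u hu => (List.pairwise_cons.mp hs).1 u hu)]
      simp

lemma bkt_eq_filter_range (m : List Int) (v : Int) :
    pvBkt m v = (PySem.List.pyRange 0 (PySem.List.len m)).filter
      (fun i => PySem.List.pyGetD m i 0 == v) := by
  unfold pvBkt
  rw [PySem.List.enumerate_eq_map_pyRange m 0, List.filter_map, List.map_map]
  simp [Function.comp_def]

lemma order_index_eq_canon (m : List Int) (h : m ≠ []) : order_index m = pvCanon m := by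
  unfold order_index pvCanon
  have hsort := sorted_rev_group (fun i => PySem.List.pyGetD m i 0)
    (PySem.List.pyRange 0 (PySem.List.len m))
  rw [PySem.List.map_pyGetD_pyRange_zero] at hsort
  have hvs_ne : PySem.List.sorted (PySem.List.dedup m) (fun v => v) true ≠ [] := by
    rw [Ne, PySem.List.sorted_eq_nil_iff]
    intro hd
    obtain ⟨y, hy⟩ := List.exists_mem_of_ne_nil m h
    exact absurd ((PySem.List.mem_dedup m y).mpr hy) (by rw [hd]; simp)
  obtain ⟨v0, tl, hvs⟩ := List.exists_cons_of_ne_nil hvs_ne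
  have hmemvs : ∀ w : Int, w ∈ v0 :: tl ↔ w ∈ m := by
    intro w
    rw [← hvs, PySem.List.mem_sorted, PySem.List.mem_dedup]
  have hgkeys : ∀ w : Int, ∀ i ∈ (PySem.List.pyRange 0 (PySem.List.len m)).filter
      (fun i => PySem.List.pyGetD m i 0 == w), PySem.List.pyGetD m i 0 = w := by
    intro w i hi
    simpa using List.of_mem_filter hi
  have hgne : ∀ w ∈ v0 :: tl, (PySem.List.pyRange 0 (PySem.List.len m)).filter
      (fun i => PySem.List.pyGetD m i 0 == w) ≠ [] := by
    intro w hw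
    obtain ⟨n, hn, hnm⟩ := List.mem_iff_getElem.mp ((hmemvs w).mp hw)
    apply List.ne_nil_of_mem (a := (n : Int))
    apply List.mem_filter.mpr
    refine ⟨?_, by simp [hn, hnm]⟩
    rw [PySem.List.mem_pyRange_one]
    constructor
    · exact Int.natCast_nonneg n
    · simpa [PySem.List.len] using hn
  obtain ⟨h0, rest, hg0⟩ := List.exists_cons_of_ne_nil (hgne v0 (by simp))
  have hpair : (v0 :: tl).Pairwise (fun a b => b < a) := by
    rw [← hvs]; exact sorted_dedup_pairwise_gt m
  rw [hsort, hvs, List.flatMap_cons, hg0]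
  simp only [List.cons_append]
  rw [List.foldl_append]
  have hb1 := fold_block m v0 rest
    (fun i hi => hgkeys v0 i (by rw [hg0]; exact List.mem_cons_of_mem _ hi)) [] [h0]
    (by simp) (by
      have := PySem.List.pyGetD_neg_one_append_singleton ([] : List Int) h0 0
      simp only [List.nil_append] at this
      rw [this]; exact hgkeys v0 h0 (by rw [hg0]; simp))
  simp only [List.nil_append] at hb1
  rw [hb1]
  have hco : [h0] ++ rest = (PySem.List.pyRange 0 (PySem.List.len m)).filter
      (fun i => PySem.List.pyGetD m i 0 == v0) := by rw [hg0, List.singleton_append]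
  rw [hco]
  have hb2 := fold_flatten m
    (fun w => (PySem.List.pyRange 0 (PySem.List.len m)).filter
      (fun i => PySem.List.pyGetD m i 0 == w))
    tl (List.pairwise_cons.mp hpair).2 (fun u hu => hgkeys u) (fun u hu => hgne u (by simp [hu]))
    [] ((PySem.List.pyRange 0 (PySem.List.len m)).filter
      (fun i => PySem.List.pyGetD m i 0 == v0)) v0 (hgne v0 (by simp))
    (by
      rw [PySem.List.pyGetD_neg_one _ 0 (hgne v0 (by simp))]
      exact hgkeys v0 _ (List.getLast_mem _))
    (fun u hu => (List.pairwise_cons.mp hpair).1 u hu)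
  simp only [List.nil_append] at hb2
  rw [hb2]
  simp only [List.map_cons, List.singleton_append]
  congr 1
  · exact (bkt_eq_filter_range m v0).symm
  · exact (List.map_congr_left (fun u _ => (bkt_eq_filter_range m u).symm))

lemma order_index_alt_eq_canon (m : List Int) : order_index_alt m = pvCanon m := by
  unfold order_index_alt pvCanon
  have hswap : (PySem.List.enumerate m 0).foldl
      (fun d p => d.modify p.2 [] (fun l => l ++ [p.1])) PySem.Dict.empty
      = ((PySem.List.enumerate m 0).map Prod.swap).foldl
        (fun d p => d.modify p.1 [] (fun l => l ++ [p.2])) PySem.Dict.empty := by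
    simp only [List.foldl_map, Prod.fst_swap, Prod.snd_swap]
  have hkeys : ((PySem.List.enumerate m 0).foldl
      (fun d p => d.modify p.2 [] (fun l => l ++ [p.1])) PySem.Dict.empty).keys
      = PySem.List.dedup m := by
    rw [PySem.Dict.keys_foldl_modify_key (PySem.List.enumerate m 0) (fun p => p.2) []
      (fun _ p => fun l => l ++ [p.1]) PySem.Dict.empty]
    have : List.map (fun p => p.2) (PySem.List.enumerate m 0) = m :=
      PySem.List.map_snd_enumerate m 0
    rw [this, PySem.List.dedup_eq_ofList]
    rfl
  have hget : ∀ v : Int, ((PySem.List.enumerate m 0).foldl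
      (fun d p => d.modify p.2 [] (fun l => l ++ [p.1])) PySem.Dict.empty).getD v []
      = pvBkt m v := by
    intro v
    rw [hswap, PySem.Dict.getD_foldl_modify_append, List.filter_map, List.map_map]
    unfold pvBkt
    simp [Function.comp_def, Prod.fst_swap, Prod.snd_swap]
  simp only [hkeys]
  exact List.map_congr_left (fun v _ => hget v)

-- ===== VERDICT (by name: the statement is the Claim_ definition above) =====
theorem order_index_spec : Claim_equal_order_index := by
  intro m _ hpre
  unfold Spec_order_index
  rw [order_index_eq_canon m hpre, order_index_alt_eq_canon m]

@[simp] theorem order_index_raises : Claim_raises_order_index := by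
  unfold Claim_raises_order_index
  exact ⟨fun m _ hr => by simp [Raises_order_index] at hr; simp [Pre_order_index, hr], by decide⟩
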